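-- pv_equiv track=rewrite | github.com/NlightN22/xray-p2p | scripts/xp2p_winrm.py | _windows_quote
-- ===== SOURCE A (Python) =====
-- def _windows_quote(arg: str) -> str:
--     if not arg:
--         return '""'
--     needs_quotes = any(ch in arg for ch in ' \t"')
--     if not needs_quotes:
--         return arg
--     result = '"'
--     backslashes = 0
--     for ch in arg:
--         if ch == "\\":
--             backslashes += 1
--         elif ch == '"':
--             result += "\\" * (backslashes * 2 + 1)
--             result += '"'
--             backslashes = 0
--         else:
--             if backslashes:
--                 result += "\\" * backslashes
--                 backslashes = 0
--             result += ch
--     result += "\\" * (backslashes * 2)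
--     result += '"'
--     return result
-- ===== SOURCE B (Python) =====
-- def _windows_quote(arg: str) -> str:
--     if not arg:
--         return '""'
--     if not any(ch in arg for ch in ' \t"'):
--         return arg
--     def dbl(p: str) -> str:
--         return p + "\\" * (len(p) - len(p.rstrip("\\")))
--     return '"' + '\\"'.join(dbl(p) for p in arg.split('"')) + '"'
-- ===== Notes on version B (the rewrite author's own statement) =====
-- stated objective: simpler
-- what changed: Replaces A's stateful per-character loop with a running backslash counter by a declarative pipeline: split the argument on the double-quote character, double each part's trailing backslash run, and join the parts with a backslash-escaped quote between the outer quotes.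
import Mathlib
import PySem

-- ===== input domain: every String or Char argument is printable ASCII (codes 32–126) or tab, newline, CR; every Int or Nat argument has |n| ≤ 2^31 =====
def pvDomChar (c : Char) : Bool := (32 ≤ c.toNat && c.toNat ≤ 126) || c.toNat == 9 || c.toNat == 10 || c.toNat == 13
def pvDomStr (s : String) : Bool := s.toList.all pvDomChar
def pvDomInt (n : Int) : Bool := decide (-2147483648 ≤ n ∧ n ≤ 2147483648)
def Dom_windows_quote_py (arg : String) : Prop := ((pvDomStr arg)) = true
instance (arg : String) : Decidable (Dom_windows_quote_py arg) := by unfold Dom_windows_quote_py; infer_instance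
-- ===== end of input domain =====

-- B replaces A's stateful per-character loop and backslash counter by split-on-quote /
-- double-trailing-backslashes / a join with an escaped quote (objective: simpler); return value only.

-- ===== PORT A =====
-- one step of A's for-loop: state = (result so far, pending backslash count)
def pvAStep (st : List Char × Nat) (ch : Char) : List Char × Nat :=
  if ch = '\\' then (st.1, st.2 + 1)
  else if ch = '"' then (st.1 ++ List.replicate (st.2 * 2 + 1) '\\' ++ ['"'], 0)
  else (st.1 ++ (if st.2 ≠ 0 then List.replicate st.2 '\\' else []) ++ [ch], 0)

def windows_quote_py (arg : String) : String :=
  if arg.toList = [] then "\"\""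
  else
    let needs_quotes := [' ', '\t', '"'].any (fun ch => arg.toList.contains ch)
    if !needs_quotes then arg
    else
      let st := arg.toList.foldl pvAStep (['"'], 0)
      String.ofList (st.1 ++ List.replicate (st.2 * 2) '\\' ++ ['"'])

-- ===== PORT B =====
-- arg.split('"')
def pvSplitQ : List Char → List (List Char)
  | [] => [[]]
  | c :: t =>
    if c = '"' then [] :: pvSplitQ t
    else
      match pvSplitQ t with
      | p :: ps => (c :: p) :: ps
      | [] => [[c]]

-- len(p) - len(p.rstrip('\\')): number of trailing backslashes
def pvTrailBS (p : List Char) : Nat := (p.reverse.takeWhile (· = '\\')).length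

-- dbl: append one extra backslash per trailing backslash
def pvDbl (p : List Char) : List Char := p ++ List.replicate (pvTrailBS p) '\\'

def windows_quote_py_alt (arg : String) : String :=
  if arg.toList = [] then "\"\""
  else if !([' ', '\t', '"'].any (fun ch => arg.toList.contains ch)) then arg
  else
    String.ofList ('"' :: List.intercalate ['\\', '"'] ((pvSplitQ arg.toList).map pvDbl) ++ ['"'])

-- ===== PRECONDITION & SPEC =====
def Spec_windows_quote_py (arg : String) (out : String) : Prop := out = windows_quote_py_alt arg
instance (arg : String) (out : String) : Decidable (Spec_windows_quote_py arg out) := by unfold Spec_windows_quote_py; infer_instance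

-- ===== CLAIM (what is proved, stated in full; the proofs are below) =====
def Claim_equal_windows_quote_py : Prop := ∀ (arg : String), Dom_windows_quote_py arg → Spec_windows_quote_py arg (windows_quote_py arg)

-- ===== LEMMAS AND PROOFS =====

-- B's escaped body (between the outer quotes)
def pvBody (cs : List Char) : List Char :=
  List.intercalate ['\\', '"'] ((pvSplitQ cs).map pvDbl)

theorem pvSplitQ_ne_nil (cs : List Char) : pvSplitQ cs ≠ [] := by
  cases cs with
  | nil => simp [pvSplitQ]
  | cons c t =>
    simp only [pvSplitQ]
    split
    · simp
    · cases h : pvSplitQ t <;> simp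

theorem pvSplitQ_cons_ne (c : Char) (t : List Char) (hc : c ≠ '"') :
    pvSplitQ (c :: t) = (c :: (pvSplitQ t).headI) :: (pvSplitQ t).tail := by
  simp only [pvSplitQ, if_neg hc]
  cases h : pvSplitQ t with
  | nil => exact absurd h (pvSplitQ_ne_nil t)
  | cons p ps => simp [List.headI]

theorem takeWhile_append_not {p : Char → Bool} (u v : List Char) (c : Char) (hc : p c = false) :
    List.takeWhile p (u ++ c :: v) = List.takeWhile p u := by
  induction u with
  | nil => simp [List.takeWhile, hc]
  | cons a u ih =>
    simp only [List.cons_append, List.takeWhile]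
    cases p a <;> simp [ih]

theorem takeWhile_bs_replicate (b : Nat) :
    List.takeWhile (· = '\\') (List.replicate b '\\') = List.replicate b '\\' := by
  induction b with
  | zero => rfl
  | succ n ih => simp [List.replicate_succ, ih]

theorem pvTrailBS_replicate (b : Nat) : pvTrailBS (List.replicate b '\\') = b := by
  simp only [pvTrailBS, List.reverse_replicate, takeWhile_bs_replicate, List.length_replicate]

theorem pvTrailBS_prefix (u : List Char) (c : Char) (v : List Char) (hc : c ≠ '\\') :
    pvTrailBS (u ++ c :: v) = pvTrailBS v := by
  simp only [pvTrailBS, List.reverse_append, List.reverse_cons, List.append_assoc,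
    List.singleton_append]
  rw [takeWhile_append_not _ _ c (by simp [hc])]

theorem pvDbl_prefix (b : Nat) (c : Char) (p : List Char) (hc : c ≠ '\\') :
    pvDbl (List.replicate b '\\' ++ c :: p) = List.replicate b '\\' ++ c :: pvDbl p := by
  simp [pvDbl, pvTrailBS_prefix (List.replicate b '\\') c p hc]

theorem pvDbl_replicate (b : Nat) :
    pvDbl (List.replicate b '\\') = List.replicate (b * 2) '\\' := by
  simp [pvDbl, pvTrailBS_replicate, ← List.replicate_add]
  omega

theorem pvSplitQ_repl_append (b : Nat) (xs : List Char) :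
    pvSplitQ (List.replicate b '\\' ++ xs) =
      (List.replicate b '\\' ++ (pvSplitQ xs).headI) :: (pvSplitQ xs).tail := by
  induction b with
  | zero =>
    simp only [List.replicate_zero, List.nil_append]
    cases h : pvSplitQ xs with
    | nil => exact absurd h (pvSplitQ_ne_nil xs)
    | cons p ps => simp [List.headI]
  | succ n ih =>
    rw [List.replicate_succ, List.cons_append, pvSplitQ_cons_ne _ _ (by decide), ih]
    simp [List.headI]

theorem intercalate_cons_cons (sep x y : List Char) (l : List (List Char)) :
    List.intercalate sep (x :: y :: l) = x ++ sep ++ List.intercalate sep (y :: l) := by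
  simp [List.intercalate, List.intersperse]

theorem intercalate_singleton (sep x : List Char) :
    List.intercalate sep [x] = x := by
  simp [List.intercalate, List.intersperse]

-- body of a pure backslash run
theorem pvBody_repl (b : Nat) :
    pvBody (List.replicate b '\\') = List.replicate (b * 2) '\\' := by
  have h : List.replicate b '\\' = List.replicate b '\\' ++ ([] : List Char) := by simp
  rw [pvBody, h, pvSplitQ_repl_append]
  simp [pvSplitQ, List.headI, intercalate_singleton, pvDbl_replicate]

-- body over a backslash run followed by a quote
theorem pvBody_repl_quote (b : Nat) (t : List Char) :
    pvBody (List.replicate b '\\' ++ '"' :: t) =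
      List.replicate (b * 2 + 1) '\\' ++ '"' :: pvBody t := by
  rw [pvBody, pvSplitQ_repl_append]
  have hq : pvSplitQ ('"' :: t) = [] :: pvSplitQ t := by simp [pvSplitQ]
  rw [hq]
  cases h : pvSplitQ t with
  | nil => exact absurd h (pvSplitQ_ne_nil t)
  | cons p ps =>
    simp only [List.headI, List.tail_cons, List.map_cons, List.append_nil]
    rw [intercalate_cons_cons, pvDbl_replicate, pvBody, h]
    simp [List.replicate_succ']

-- body over a backslash run followed by an ordinary character
theorem pvBody_repl_other (b : Nat) (c : Char) (t : List Char)
    (h1 : c ≠ '\\') (h2 : c ≠ '"') :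
    pvBody (List.replicate b '\\' ++ c :: t) =
      List.replicate b '\\' ++ c :: pvBody t := by
  rw [pvBody, pvSplitQ_repl_append, pvSplitQ_cons_ne c t h2]
  cases hs : pvSplitQ t with
  | nil => exact absurd hs (pvSplitQ_ne_nil t)
  | cons p ps =>
    simp only [List.headI, List.tail_cons, List.map_cons]
    rw [pvDbl_prefix b c _ h1]
    cases ps with
    | nil => simp [intercalate_singleton, pvBody, hs]
    | cons q qs => simp [intercalate_cons_cons, pvBody, hs, List.append_assoc]

-- main loop invariant: A's fold from state (res, b) produces res ++ pvBody (repl b ++ t) ++ ['"']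
theorem pvMain (t : List Char) (b : Nat) (res : List Char) :
    (t.foldl pvAStep (res, b)).1 ++
        List.replicate ((t.foldl pvAStep (res, b)).2 * 2) '\\' ++ ['"'] =
      res ++ pvBody (List.replicate b '\\' ++ t) ++ ['"'] := by
  induction t generalizing b res with
  | nil => simp [pvBody_repl]
  | cons c t ih =>
    rcases eq_or_ne c '\\' with hc | hc
    · subst hc
      have hstep : pvAStep (res, b) '\\' = (res, b + 1) := by simp [pvAStep]
      rw [List.foldl_cons, hstep, ih (b + 1) res]
      have : List.replicate b '\\' ++ '\\' :: t = List.replicate (b + 1) '\\' ++ t := by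
        rw [List.replicate_succ']; simp
      rw [this]
    · rcases eq_or_ne c '"' with hq | hq
      · subst hq
        have hstep : pvAStep (res, b) '"' =
            (res ++ List.replicate (b * 2 + 1) '\\' ++ ['"'], 0) := by
          simp [pvAStep, hc]
        rw [List.foldl_cons, hstep, ih 0 _, pvBody_repl_quote]
        simp
      · have hb : (if b ≠ 0 then List.replicate b '\\' else []) = List.replicate b '\\' := by
          rcases Nat.eq_zero_or_pos b with h | h <;> simp [h]
        have hstep : pvAStep (res, b) c = (res ++ List.replicate b '\\' ++ [c], 0) := by
          simp [pvAStep, hc, hq, hb]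
        rw [List.foldl_cons, hstep, ih 0 _, pvBody_repl_other b c t hc hq]
        simp

-- ===== VERDICT (by name: the statement is the Claim_ definition above) =====
theorem windows_quote_py_spec : Claim_equal_windows_quote_py := by
  intro arg _
  unfold Spec_windows_quote_py windows_quote_py windows_quote_py_alt
  by_cases h0 : arg.toList = []
  · rw [if_pos h0, if_pos h0]
  · rw [if_neg h0, if_neg h0]
    by_cases hn : ([' ', '\t', '"'].any (fun ch => arg.toList.contains ch)) = true
    · have hb : (!([' ', '\t', '"'].any fun ch => arg.toList.contains ch)) = false := by
        rw [hn]; rfl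
      simp only [hb, Bool.false_eq_true, if_false]
      have h := pvMain arg.toList 0 ['"']
      simp only [List.replicate_zero, List.nil_append] at h
      rw [h]
      simp [pvBody]
    · have hb : (!([' ', '\t', '"'].any fun ch => arg.toList.contains ch)) = true := by
        cases hx : ([' ', '\t', '"'].any fun ch => arg.toList.contains ch)
        · rfl
        · exact absurd hx hn
      simp only [hb, if_true]
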